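-- pv_equiv track=rewrite | github.com/T-Ginger-J/Leetcode | 2025/October/17/candy.py | candyHillClimb
-- ===== SOURCE A (Python) =====
-- def candyHillClimb(ratings: list[int]) -> int:
--     up = down = peak = 0
--     candies = 1
--     for i in range(1, len(ratings)):
--         if ratings[i] > ratings[i - 1]:
--             up += 1
--             peak = up
--             down = 0
--             candies += 1 + up
--         elif ratings[i] == ratings[i - 1]:
--             up = down = peak = 0
--             candies += 1
--         else:
--             up = 0
--             down += 1
--             candies += 1 + down - (1 if peak >= down else 0)
--     return candies
-- ===== SOURCE B (Python) =====
-- def candyHillClimb(ratings: list[int]) -> int: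
--     def lefts(rs):
--         if not rs:
--             return []
--         out = [1]
--         prev = rs[0]
--         c = 1
--         for r in rs[1:]:
--             c = c + 1 if r > prev else 1
--             out.append(c)
--             prev = r
--         return out
--     left = lefts(ratings)
--     right = lefts(ratings[::-1])[::-1]
--     return sum(max(a, b) for a, b in zip(left, right))
-- ===== Notes on version B (the rewrite author's own statement) =====
-- stated objective: alternative
-- what changed: Replaced the single-pass up/down/peak slope bookkeeping with the classic two-pass solution: one helper computes increasing-run candy counts left-to-right, it is reused on the reversed list for the right-to-left counts, and the answer is the sum of pointwise maxima.
-- intended difference: On the empty list A returns 1 (its candies accumulator starts at 1 before any child is seen) while B returns 0, the intended total for zero children. — e.g. on candyHillClimb([]): A returns 1, B returns 0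
import Mathlib
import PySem

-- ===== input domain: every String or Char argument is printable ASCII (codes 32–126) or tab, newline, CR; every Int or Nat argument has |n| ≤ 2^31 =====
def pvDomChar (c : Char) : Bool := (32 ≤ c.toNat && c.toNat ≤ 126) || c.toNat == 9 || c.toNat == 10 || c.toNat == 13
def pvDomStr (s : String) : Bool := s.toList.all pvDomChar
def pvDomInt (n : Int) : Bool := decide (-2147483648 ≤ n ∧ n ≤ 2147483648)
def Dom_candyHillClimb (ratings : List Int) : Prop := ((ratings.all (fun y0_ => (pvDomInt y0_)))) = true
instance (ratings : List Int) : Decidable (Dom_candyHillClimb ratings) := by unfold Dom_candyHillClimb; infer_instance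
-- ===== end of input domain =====

-- B replaces A's one-pass up/down/peak slope bookkeeping by the classic two-pass
-- left/right max solution (same O(n) cost); on the empty list B returns the intended 0
-- where A returns its accidental initial accumulator 1 (see D_candyHillClimb).

-- ===== PORT A =====
-- pyGetD is exact here: every index i used satisfies 1 ≤ i < len ratings, so i and i-1 are in range.
def candyHillClimb (ratings : List Int) : Int :=
  ((PySem.List.pyRange 1 (ratings.length : Int) 1).foldl
    (fun (s : Int × Int × Int × Int) (i : Int) =>
      if PySem.List.pyGetD ratings i 0 > PySem.List.pyGetD ratings (i - 1) 0 then
        (s.1 + 1, 0, s.1 + 1, s.2.2.2 + 1 + (s.1 + 1))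
      else if PySem.List.pyGetD ratings i 0 = PySem.List.pyGetD ratings (i - 1) 0 then
        (0, 0, 0, s.2.2.2 + 1)
      else
        (0, s.2.1 + 1, s.2.2.1,
          s.2.2.2 + 1 + (s.2.1 + 1) - (if s.2.2.1 ≥ s.2.1 + 1 then 1 else 0)))
    (0, 0, 0, 1)).2.2.2

-- ===== PORT B =====
-- the 'for r in rs[1:]' loop of Source B's lefts, threading (prev, c)
def pvLeftsGo (p c : Int) : List Int → List Int
  | [] => []
  | r :: t => let c' := if r > p then c + 1 else 1; c' :: pvLeftsGo r c' t

def pvLefts : List Int → List Int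
  | [] => []
  | a :: t => 1 :: pvLeftsGo a 1 t

def candyHillClimb_alt (ratings : List Int) : Int :=
  let left := pvLefts ratings
  let right := (pvLefts ratings.reverse).reverse
  (List.zipWith max left right).sum

-- ===== PRECONDITION & SPEC =====
-- On the empty list A returns 1 (its candies accumulator starts at 1 before any child is
-- seen) while B returns 0, the intended total for zero children.
def D_candyHillClimb (ratings : List Int) : Prop := ratings = []
instance (ratings : List Int) : Decidable (D_candyHillClimb ratings) := by
  unfold D_candyHillClimb; infer_instance

def Spec_candyHillClimb (ratings : List Int) (out : Int) : Prop :=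
  ¬ D_candyHillClimb ratings → out = candyHillClimb_alt ratings
instance (ratings : List Int) (out : Int) : Decidable (Spec_candyHillClimb ratings out) := by
  unfold Spec_candyHillClimb; infer_instance

def pvDiffWitness_candyHillClimb : List Int := []
def pvDiffWitnessOut_candyHillClimb : Int × Int := (1, 0)

-- ===== CLAIM (what is proved, stated in full; the proofs are below) =====
def Claim_unchanged_candyHillClimb : Prop := ∀ (ratings : List Int), Dom_candyHillClimb ratings → Spec_candyHillClimb ratings (candyHillClimb ratings)
def Claim_changed_candyHillClimb : Prop := Dom_candyHillClimb (pvDiffWitness_candyHillClimb) ∧ D_candyHillClimb (pvDiffWitness_candyHillClimb) ∧ candyHillClimb (pvDiffWitness_candyHillClimb) = pvDiffWitnessOut_candyHillClimb.1 ∧ candyHillClimb_alt (pvDiffWitness_candyHillClimb) = pvDiffWitnessOut_candyHillClimb.2 ∧ pvDiffWitnessOut_candyHillClimb.1 ≠ pvDiffWitnessOut_candyHillClimb.2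
def Claim_exact_candyHillClimb : Prop := ∀ (ratings : List Int), Dom_candyHillClimb ratings → D_candyHillClimb ratings → candyHillClimb ratings ≠ candyHillClimb_alt ratings

-- ===== LEMMAS AND PROOFS =====

-- A's loop body as a function of the state and the (previous, current) rating pair
def pvStep (s : Int × Int × Int × Int) (pr : Int × Int) : Int × Int × Int × Int :=
  if pr.2 > pr.1 then (s.1 + 1, 0, s.1 + 1, s.2.2.2 + 1 + (s.1 + 1))
  else if pr.2 = pr.1 then (0, 0, 0, s.2.2.2 + 1)
  else (0, s.2.1 + 1, s.2.2.1,
    s.2.2.2 + 1 + (s.2.1 + 1) - (if s.2.2.1 ≥ s.2.1 + 1 then 1 else 0))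

-- list of adjacent (previous, current) pairs
def pvPairs : List Int → List (Int × Int)
  | [] => []
  | [_] => []
  | a :: b :: t => (a, b) :: pvPairs (b :: t)

def pvAfold (xs : List Int) : Int × Int × Int × Int := (pvPairs xs).foldl pvStep (0, 0, 0, 1)

-- right-to-left candy counts, computed head-first: 1 + length of strict descent starting here
def pvRvals : List Int → List Int
  | [] => []
  | [_] => [1]
  | a :: b :: t => (if a > b then (pvRvals (b :: t)).headD 0 + 1 else 1) :: pvRvals (b :: t)

-- [n, n-1, …, 1] as Ints
def pvDesc : Nat → List Int
  | 0 => []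
  | n + 1 => ((n : Int) + 1) :: pvDesc n

-- strictly decreasing list
def pvSDec : List Int → Prop
  | [] => True
  | [_] => True
  | a :: b :: t => a > b ∧ pvSDec (b :: t)

def pvTP (xs : List Int) : Int := (List.zipWith max (pvLefts xs) (pvRvals xs)).sum

-- ---- basic length / nonemptiness facts ----
theorem pvLeftsGo_length (t : List Int) : ∀ p c, (pvLeftsGo p c t).length = t.length := by
  induction t with
  | nil => intro p c; simp [pvLeftsGo]
  | cons r t ih => intro p c; simp [pvLeftsGo, ih]

theorem pvLefts_length (xs : List Int) : (pvLefts xs).length = xs.length := by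
  cases xs with
  | nil => rfl
  | cons a t => simp [pvLefts, pvLeftsGo_length]

theorem pvRvals_length (xs : List Int) : (pvRvals xs).length = xs.length := by
  induction xs using pvRvals.induct with
  | case1 => rfl
  | case2 a => rfl
  | case3 a b t ih => simp [pvRvals, ih]

theorem pvRvals_ne_nil (xs : List Int) (h : xs ≠ []) : pvRvals xs ≠ [] := by
  intro hc
  have := pvRvals_length xs
  rw [hc] at this
  exact h (List.eq_nil_of_length_eq_zero this.symm)

-- ---- getLast? / headD helpers ----
theorem pvGLD_cons (l : List Int) (a d : Int) : (a :: l).getLast?.getD d = l.getLast?.getD a := by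
  cases l with
  | nil => simp
  | cons b t =>
    rw [List.getLast?_cons_cons, List.getLast?_eq_some_getLast (l := b :: t) (by simp)]
    rfl

theorem pvGLD_irrel (l : List Int) (h : l ≠ []) (d d' : Int) :
    l.getLast?.getD d = l.getLast?.getD d' := by
  rw [List.getLast?_eq_some_getLast (l := l) h]; rfl

theorem pvGLD_append (x0 l : List Int) (d : Int) (h : l ≠ []) :
    (x0 ++ l).getLast?.getD d = l.getLast?.getD d := by
  induction x0 generalizing d with
  | nil => rfl
  | cons a x0 ih => rw [List.cons_append, pvGLD_cons, ih a, pvGLD_irrel l h a d]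

theorem pvGLD_reverse (l : List Int) (d : Int) : (l.reverse).getLast?.getD d = l.headD d := by
  cases l with
  | nil => rfl
  | cons a t => simp

theorem pvGLD_replicate (k : Nat) (a d : Int) :
    (a :: List.replicate k (1 : Int)).getLast?.getD d = if k = 0 then a else 1 := by
  induction k generalizing a d with
  | zero => simp
  | succ k ih =>
    rw [List.replicate_succ, pvGLD_cons, ih 1 a]
    simp

theorem pvHeadD_append (l l' : List Int) (d : Int) (h : l ≠ []) :
    (l ++ l').headD d = l.headD d := by
  cases l with
  | nil => exact absurd rfl h
  | cons a t => rfl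

-- ---- snoc lemmas for the left pass ----
theorem pvLeftsGo_snoc (t : List Int) (p c z : Int) :
    pvLeftsGo p c (t ++ [z]) =
      pvLeftsGo p c t ++
        [if z > t.getLast?.getD p then (pvLeftsGo p c t).getLast?.getD c + 1 else 1] := by
  induction t generalizing p c with
  | nil => simp [pvLeftsGo]
  | cons r t ih =>
    simp only [List.cons_append, pvLeftsGo, ih, pvGLD_cons]

theorem pvLefts_snoc (ys : List Int) (z : Int) (h : ys ≠ []) :
    pvLefts (ys ++ [z]) =
      pvLefts ys ++ [if z > ys.getLast?.getD 0 then (pvLefts ys).getLast?.getD 0 + 1 else 1] := by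
  cases ys with
  | nil => exact absurd rfl h
  | cons a t =>
    simp only [List.cons_append, pvLefts, pvLeftsGo_snoc, pvGLD_cons]

-- ---- B's right pass equals pvRvals ----
theorem pvLefts_reverse (xs : List Int) : pvLefts xs.reverse = (pvRvals xs).reverse := by
  induction xs using pvRvals.induct with
  | case1 => rfl
  | case2 a => rfl
  | case3 a b t ih =>
    have hrev : (a :: b :: t).reverse = (b :: t).reverse ++ [a] := by simp
    rw [hrev, pvLefts_snoc _ _ (by simp), ih, pvGLD_reverse, pvGLD_reverse]
    show (pvRvals (b :: t)).reverse ++ _ = (pvRvals (a :: b :: t)).reverse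
    rw [pvRvals, List.reverse_cons]
    rfl

theorem pvAlt_eq_TP (xs : List Int) : candyHillClimb_alt xs = pvTP xs := by
  simp [candyHillClimb_alt, pvTP, pvLefts_reverse]

-- ---- pvRvals structure lemmas ----
theorem pvRvals_snoc_flat (xs : List Int) (z : Int) (h : xs ≠ [])
    (hlast : ¬ xs.getLast?.getD 0 > z) : pvRvals (xs ++ [z]) = pvRvals xs ++ [1] := by
  induction xs using pvRvals.induct with
  | case1 => exact absurd rfl h
  | case2 a =>
    rw [pvGLD_cons] at hlast
    simp only [Option.getD_none, List.getLast?_nil] at hlast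
    simp [pvRvals, hlast]
  | case3 a b t ih =>
    have hlast' : ¬ (b :: t).getLast?.getD 0 > z := by
      rw [pvGLD_cons] at hlast
      rwa [pvGLD_irrel (b :: t) (by simp) 0 a]
    have ih' := ih (by simp) hlast'
    have hne := pvRvals_ne_nil (b :: t) (by simp)
    simp only [List.cons_append] at ih'
    simp only [List.cons_append, pvRvals, ih', pvHeadD_append _ _ _ hne]

theorem pvDropLast_headD (L : List Int) (h : 2 ≤ L.length) :
    L.dropLast ≠ [] ∧ (L.dropLast).headD 0 = L.headD 0 := by
  match L, h with
  | x :: y :: rest, _ => simp [List.dropLast]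

theorem pvRvals_split (x0 : List Int) (e : Int) (t : List Int)
    (hg : ∀ w, x0.getLast? = some w → ¬ w > e) :
    pvRvals (x0 ++ e :: t) = (pvRvals (x0 ++ [e])).dropLast ++ pvRvals (e :: t) := by
  induction x0 using pvRvals.induct with
  | case1 => simp [pvRvals]
  | case2 w =>
    have hw : ¬ w > e := hg w (by simp)
    simp [pvRvals, hw]
  | case3 w v t0 ih =>
    have hg' : ∀ u, (v :: t0).getLast? = some u → ¬ u > e := by
      intro u hu; exact hg u (by simpa [List.getLast?_cons_cons] using hu)
    have ih' := ih hg'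
    have hlen : 2 ≤ (pvRvals ((v :: t0) ++ [e])).length := by
      rw [pvRvals_length]; simp
    obtain ⟨hne, hhead⟩ := pvDropLast_headD _ hlen
    have hR_ne : pvRvals ((v :: t0) ++ [e]) ≠ [] := by
      intro hc; rw [hc] at hlen; simp at hlen
    have hhead2 : (pvRvals ((v :: t0) ++ e :: t)).headD 0
        = (pvRvals ((v :: t0) ++ [e])).headD 0 := by
      rw [ih', pvHeadD_append _ _ _ hne, hhead]
    calc pvRvals ((w :: v :: t0) ++ e :: t)
        = (if w > v then (pvRvals ((v :: t0) ++ e :: t)).headD 0 + 1 else 1)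
            :: pvRvals ((v :: t0) ++ e :: t) := by
          simp only [List.cons_append, pvRvals]
      _ = (if w > v then (pvRvals ((v :: t0) ++ [e])).headD 0 + 1 else 1)
            :: ((pvRvals ((v :: t0) ++ [e])).dropLast ++ pvRvals (e :: t)) := by
          rw [hhead2, ih']
      _ = (pvRvals ((w :: v :: t0) ++ [e])).dropLast ++ pvRvals (e :: t) := by
          have hx : pvRvals ((w :: v :: t0) ++ [e])
              = (if w > v then (pvRvals ((v :: t0) ++ [e])).headD 0 + 1 else 1)
                  :: pvRvals ((v :: t0) ++ [e]) := by
            simp only [List.cons_append, pvRvals]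
          rw [hx, List.dropLast_cons_of_ne_nil hR_ne]
          simp

theorem pvHeadD_desc (n : Nat) : (pvDesc (n + 1)).headD 0 = (n : Int) + 1 := rfl

theorem pvRvals_sdec (l : List Int) (h : pvSDec l) : pvRvals l = pvDesc l.length := by
  induction l using pvRvals.induct with
  | case1 => rfl
  | case2 a => simp [pvRvals, pvDesc]
  | case3 a b t ih =>
    obtain ⟨hab, h2⟩ := h
    have ih' := ih h2
    rw [pvRvals, ih']
    simp only [List.length_cons, hab, if_pos, pvHeadD_desc]
    show ((t.length : Int) + 1 + 1) :: pvDesc (t.length + 1) = pvDesc (t.length + 1 + 1)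
    rfl

theorem pvSDec_snoc (l : List Int) (z : Int) (h : pvSDec l)
    (hl : l.getLast?.getD 0 > z) : pvSDec (l ++ [z]) := by
  induction l using pvRvals.induct with
  | case1 => trivial
  | case2 a =>
    rw [pvGLD_cons] at hl
    simp only [List.getLast?_nil, Option.getD_none] at hl
    exact ⟨hl, trivial⟩
  | case3 a b t ih =>
    obtain ⟨hab, h2⟩ := h
    refine ⟨hab, ih h2 ?_⟩
    rw [pvGLD_cons] at hl
    rwa [pvGLD_irrel (b :: t) (by simp) 0 a]

theorem pvZipReplDesc (n : Nat) :
    List.zipWith max (List.replicate n (1 : Int)) (pvDesc n) = pvDesc n := by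
  induction n with
  | zero => rfl
  | succ n ih =>
    simp only [List.replicate_succ, pvDesc, List.zipWith_cons_cons, ih]
    congr 1
    omega

-- ---- the A-side fold over adjacent pairs ----
theorem pvPairs_snoc (t : List Int) (a z : Int) :
    pvPairs ((a :: t) ++ [z]) = pvPairs (a :: t) ++ [((a :: t).getLast?.getD 0, z)] := by
  induction t generalizing a with
  | nil => simp [pvPairs]
  | cons b t ih =>
    have h2 := ih b
    simp only [List.cons_append, pvPairs] at h2 ⊢
    simp [h2, pvGLD_cons]

theorem pvAfold_snoc (ys : List Int) (z : Int) (h : ys ≠ []) :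
    pvAfold (ys ++ [z]) = pvStep (pvAfold ys) (ys.getLast?.getD 0, z) := by
  cases ys with
  | nil => exact absurd rfl h
  | cons a t => rw [pvAfold, pvPairs_snoc, List.foldl_append]; rfl

-- ---- port A computes pvAfold's candies ----
theorem pvGetD_append_of_lt (ys : List Int) (z : Int) (i : Int) (h0 : 0 ≤ i)
    (hi : i < ys.length) : PySem.List.pyGetD (ys ++ [z]) i 0 = PySem.List.pyGetD ys i 0 := by
  rw [PySem.List.pyGetD_eq_getElem (ys ++ [z]) 0 h0 (by simp; omega),
      PySem.List.pyGetD_eq_getElem ys 0 h0 (by simpa using hi)]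
  exact List.getElem_append_left (by omega)

theorem pvRangeFold_eq (xs : List Int) :
    (PySem.List.pyRange 1 (xs.length : Int) 1).foldl
      (fun (s : Int × Int × Int × Int) (i : Int) =>
        pvStep s (PySem.List.pyGetD xs (i - 1) 0, PySem.List.pyGetD xs i 0)) (0, 0, 0, 1)
    = pvAfold xs := by
  induction xs using List.reverseRecOn with
  | nil => rw [PySem.List.pyRange_one_eq_nil (by simp)]; rfl
  | append_singleton ys z ih =>
    rcases eq_or_ne ys [] with hys | hne
    · subst hys
      rw [show (([] ++ [z] : List Int).length : Int) = 1 by simp,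
          PySem.List.pyRange_one_eq_nil (by omega)]
      rfl
    · have hpos : 0 < ys.length := List.length_pos_iff.mpr hne
      have hlen1 : (1 : Int) ≤ (ys.length : Int) := by exact_mod_cast hpos
      have hlen : ((ys ++ [z]).length : Int) = (ys.length : Int) + 1 := by
        simp
      rw [hlen, PySem.List.pyRange_one_succ_right hlen1, List.foldl_append]
      have hcongr : (PySem.List.pyRange 1 (ys.length : Int) 1).foldl
          (fun (s : Int × Int × Int × Int) (i : Int) =>
            pvStep s (PySem.List.pyGetD (ys ++ [z]) (i - 1) 0, PySem.List.pyGetD (ys ++ [z]) i 0))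
            (0, 0, 0, 1)
          = (PySem.List.pyRange 1 (ys.length : Int) 1).foldl
          (fun (s : Int × Int × Int × Int) (i : Int) =>
            pvStep s (PySem.List.pyGetD ys (i - 1) 0, PySem.List.pyGetD ys i 0)) (0, 0, 0, 1) := by
        apply PySem.List.foldl_congr_mem
        intro acc i hi
        rw [PySem.List.mem_pyRange_one] at hi
        rw [pvGetD_append_of_lt ys z i (by omega) (by omega),
            pvGetD_append_of_lt ys z (i - 1) (by omega) (by omega)]
      rw [hcongr, ih, pvAfold_snoc ys z hne]
      have hz : PySem.List.pyGetD (ys ++ [z]) ((ys.length : Int)) 0 = z := by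
        rw [PySem.List.pyGetD_eq_getElem (ys ++ [z]) 0 (by omega) (by simp)]
        simp
      have hlast : PySem.List.pyGetD (ys ++ [z]) ((ys.length : Int) - 1) 0
          = ys.getLast?.getD 0 := by
        rw [pvGetD_append_of_lt ys z _ (by omega) (by omega),
            PySem.List.pyGetD_eq_getElem ys 0 (by omega) (by omega)]
        have htn : ((ys.length : Int) - 1).toNat = ys.length - 1 := by omega
        rw [List.getLast?_eq_some_getLast (l := ys) hne]
        simp only [Option.getD_some]
        rw [List.getLast_eq_getElem]
        congr 1
      simp only [List.foldl_cons, List.foldl_nil]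
      rw [hz, hlast]

theorem pvA_eq_fold (xs : List Int) : candyHillClimb xs = (pvAfold xs).2.2.2 := by
  rw [← pvRangeFold_eq]
  rfl

-- ---- the two-pass total, decomposed around the trailing strict descent ----
theorem pvTP_decomp (x0 : List Int) (e : Int) (chain : List Int) (L0 : List Int) (peak : Int)
    (hsd : pvSDec (e :: chain))
    (hg : ∀ w, x0.getLast? = some w → ¬ w > e)
    (hL : pvLefts (x0 ++ e :: chain) = L0 ++ (peak + 1) :: List.replicate chain.length 1)
    (hlen : L0.length = x0.length) :
    pvTP (x0 ++ e :: chain) =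
      (List.zipWith max L0 (pvRvals (x0 ++ [e])).dropLast).sum
        + max (peak + 1) ((chain.length : Int) + 1) + (pvDesc chain.length).sum := by
  unfold pvTP
  rw [hL, pvRvals_split x0 e chain hg, pvRvals_sdec _ hsd]
  have hlen2 : L0.length = ((pvRvals (x0 ++ [e])).dropLast).length := by
    rw [List.length_dropLast, pvRvals_length]
    simp [hlen]
  rw [show (e :: chain).length = chain.length + 1 from by simp, pvDesc,
      List.zipWith_append hlen2, List.zipWith_cons_cons, pvZipReplDesc,
      List.sum_append, List.sum_cons]
  ring

theorem pvTP_snoc (ys : List Int) (z : Int) (hne : ys ≠ [])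
    (hflat : ¬ ys.getLast?.getD 0 > z) :
    pvTP (ys ++ [z]) =
      pvTP ys + max (if z > ys.getLast?.getD 0 then (pvLefts ys).getLast?.getD 0 + 1 else 1) 1 := by
  unfold pvTP
  rw [pvLefts_snoc ys z hne, pvRvals_snoc_flat ys z hne hflat,
      List.zipWith_append (by rw [pvLefts_length, pvRvals_length]),
      List.sum_append]
  simp

-- ---- the loop invariant of A's single pass ----
theorem pvInv (xs : List Int) (h : xs ≠ []) :
    ∃ x0 e chain L0,
      xs = x0 ++ e :: chain ∧
      pvSDec (e :: chain) ∧
      (pvAfold xs).2.1 = (chain.length : Int) ∧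
      (pvAfold xs).1 = (if chain = [] then (pvAfold xs).2.2.1 else 0) ∧
      0 ≤ (pvAfold xs).2.2.1 ∧
      (∀ w, x0.getLast? = some w → ¬ w > e) ∧
      pvLefts xs = L0 ++ ((pvAfold xs).2.2.1 + 1) :: List.replicate chain.length 1 ∧
      L0.length = x0.length ∧
      (pvAfold xs).2.2.2 = pvTP xs := by
  induction xs using List.reverseRecOn with
  | nil => exact absurd rfl h
  | append_singleton ys z ih =>
    rcases eq_or_ne ys [] with rfl | hne
    · refine ⟨[], z, [], [], by simp, trivial, by rfl, by rfl, by norm_num [pvAfold, pvPairs],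
        fun w hw => by simp at hw, by rfl, rfl, by rfl⟩
    · obtain ⟨x0, e, chain, L0, hxs, hsd, hdown, hup, hpk, hg, hL, hlen, hc⟩ := ih hne
      have hlastys : ys.getLast?.getD 0 = (e :: chain).getLast?.getD 0 := by
        rw [hxs]; exact pvGLD_append _ _ _ (by simp)
      have hsnoc := pvAfold_snoc ys z hne
      have hlastL : (pvLefts ys).getLast?.getD 0
          = if chain.length = 0 then (pvAfold ys).2.2.1 + 1 else 1 := by
        rw [hL, pvGLD_append _ _ _ (by simp), pvGLD_replicate]
      have hgetLast : ys.getLast? = some (ys.getLast?.getD 0) := by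
        rw [List.getLast?_eq_some_getLast (l := ys) hne]; rfl
      rcases lt_trichotomy (ys.getLast?.getD 0) z with hlt | heq | hgt
      · -- ratings[i] > ratings[i-1] : ascend
        have hstep : pvAfold (ys ++ [z]) =
            ((pvAfold ys).1 + 1, 0, (pvAfold ys).1 + 1,
              (pvAfold ys).2.2.2 + 1 + ((pvAfold ys).1 + 1)) := by
          rw [hsnoc]; simp [pvStep, hlt]
        have hflat : ¬ ys.getLast?.getD 0 > z := by omega
        have hlastL' : (pvLefts ys).getLast?.getD 0 = (pvAfold ys).1 + 1 := by
          rcases eq_or_ne chain [] with rfl | hch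
          · simpa using hlastL.trans (by simp [hup])
          · have : chain.length ≠ 0 := by simpa [List.length_eq_zero_iff] using hch
            rw [hlastL, if_neg this, hup, if_neg hch]
            norm_num
        refine ⟨ys, z, [], pvLefts ys, by simp, trivial, by simp [hstep], by simp [hstep],
          ?_, ?_, ?_, pvLefts_length ys, ?_⟩
        · simp only [hstep]
          have : 0 ≤ (pvAfold ys).1 := by
            rw [hup]; split <;> omega
          omega
        · intro w hw
          rw [hgetLast] at hw
          injection hw with hww
          omega
        · rw [pvLefts_snoc ys z hne, if_pos hlt, hlastL']
          simp [hstep]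
        · rw [hstep]
          simp only
          rw [pvTP_snoc ys z hne hflat, if_pos hlt, hlastL', hc]
          have : 0 ≤ (pvAfold ys).1 := by rw [hup]; split <;> omega
          omega
      · -- ratings[i] == ratings[i-1] : reset
        have h1 : ¬ ys.getLast?.getD 0 < z := by omega
        have h2 : z = ys.getLast?.getD 0 := heq.symm
        have hstep : pvAfold (ys ++ [z]) = (0, 0, 0, (pvAfold ys).2.2.2 + 1) := by
          rw [hsnoc]; simp [pvStep, h2]
        have hflat : ¬ ys.getLast?.getD 0 > z := by omega
        refine ⟨ys, z, [], pvLefts ys, by simp, trivial, by simp [hstep], by simp [hstep],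
          by simp [hstep], ?_, ?_, pvLefts_length ys, ?_⟩
        · intro w hw
          rw [hgetLast] at hw
          injection hw with hww
          omega
        · rw [pvLefts_snoc ys z hne, if_neg (by omega)]
          simp [hstep]
        · rw [hstep]
          simp only
          rw [pvTP_snoc ys z hne hflat, if_neg (by omega), hc]
          simp
      · -- descend
        have h1 : ¬ ys.getLast?.getD 0 < z := by omega
        have h2 : ¬ z = ys.getLast?.getD 0 := by omega
        have hstep : pvAfold (ys ++ [z]) =
            (0, (pvAfold ys).2.1 + 1, (pvAfold ys).2.2.1,
              (pvAfold ys).2.2.2 + 1 + ((pvAfold ys).2.1 + 1)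
                - (if (pvAfold ys).2.2.1 ≥ (pvAfold ys).2.1 + 1 then 1 else 0)) := by
          rw [hsnoc]; simp [pvStep, h1, h2]
        have hxs' : ys ++ [z] = x0 ++ e :: (chain ++ [z]) := by
          rw [hxs]; simp
        have hsd' : pvSDec (e :: (chain ++ [z])) := by
          have := pvSDec_snoc (e :: chain) z hsd (by rw [← hlastys]; omega)
          simpa using this
        have hLnew : pvLefts (ys ++ [z])
            = L0 ++ ((pvAfold ys).2.2.1 + 1) :: List.replicate (chain.length + 1) 1 := by
          rw [pvLefts_snoc ys z hne, if_neg (by omega), hL, List.replicate_succ']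
          simp
        have hTPold : pvTP ys =
            (List.zipWith max L0 (pvRvals (x0 ++ [e])).dropLast).sum
              + max ((pvAfold ys).2.2.1 + 1) ((chain.length : Int) + 1)
              + (pvDesc chain.length).sum := by
          rw [hxs] at hL ⊢
          exact pvTP_decomp x0 e chain L0 _ hsd hg hL hlen
        have hTPnew : pvTP (ys ++ [z]) =
            (List.zipWith max L0 (pvRvals (x0 ++ [e])).dropLast).sum
              + max ((pvAfold ys).2.2.1 + 1) (((chain ++ [z]).length : Int) + 1)
              + (pvDesc (chain ++ [z]).length).sum := by
          rw [hxs'] at hLnew ⊢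
          refine pvTP_decomp x0 e (chain ++ [z]) L0 _ hsd' hg ?_ hlen
          simpa using hLnew
        refine ⟨x0, e, chain ++ [z], L0, hxs', hsd', ?_, ?_, by simp [hstep, hpk], hg, ?_, hlen, ?_⟩
        · simp [hstep, hdown]
        · simp [hstep]
        · rw [hLnew]
          simp [hstep]
        · rw [hstep]
          simp only
          rw [hTPnew, hc, hTPold]
          have hdesc : (pvDesc ((chain ++ [z]).length)).sum
              = ((chain.length : Int) + 1) + (pvDesc chain.length).sum := by
            simp [pvDesc, List.sum_cons]
          rw [hdesc, hdown]
          have hcast : (((chain ++ [z]).length : Int)) = (chain.length : Int) + 1 := by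
            simp
          rw [hcast]
          split_ifs <;> omega

-- ===== VERDICT (by name: the statements are the Claim_ definitions above) =====
theorem candyHillClimb_spec : Claim_unchanged_candyHillClimb := by
  intro ratings _hdom
  unfold Spec_candyHillClimb
  intro hD
  have hne : ratings ≠ [] := fun hnil => hD hnil
  obtain ⟨x0, e, chain, L0, -, -, -, -, -, -, -, -, hTP⟩ := pvInv ratings hne
  rw [pvA_eq_fold, hTP, pvAlt_eq_TP]

theorem candyHillClimb_changed : Claim_changed_candyHillClimb := by
  unfold Claim_changed_candyHillClimb; decide

theorem candyHillClimb_tight : Claim_exact_candyHillClimb := by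
  intro ratings _ hD
  subst hD
  decide
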